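/- GENERATED by tools/port_base_units.py: every accepted proof of a base unit. -/
import ProgX.Base.Spec.Proved.range_bad
import ProgX.Base.Spec.Proved.asan_load1_noabort
import ProgX.Base.Spec.Proved.asan_store1_noabort
import ProgX.Base.Spec.Proved.asan_load2_noabort
import ProgX.Base.Spec.Proved.asan_store2_noabort
import ProgX.Base.Spec.Proved.asan_load4_noabort
import ProgX.Base.Spec.Proved.asan_store4_noabort
import ProgX.Base.Spec.Proved.asan_load8_noabort
import ProgX.Base.Spec.Proved.asan_store8_noabort
import ProgX.Base.Spec.Proved.asan_load16_noabort
import ProgX.Base.Spec.Proved.asan_store16_noabort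
import ProgX.Base.Spec.Proved.asan_storeN_noabort
import ProgX.Base.Spec.Proved.asan_loadN_noabort
import ProgX.Base.Spec.Proved.arena_unpoison
import ProgX.Base.Spec.Proved.arena_poison
import ProgX.Base.Spec.Proved.swap_bytes
import ProgX.Base.Spec.Proved.sift_down
import ProgX.Base.Spec.Proved.memcpy
import ProgX.Base.Spec.Proved.memset
import ProgX.Base.Spec.Proved.memcmp
import ProgX.Base.Spec.Proved.abs
import ProgX.Base.Spec.Proved.qsort
import ProgX.Base.Spec.Proved.two_to
import ProgX.Base.Spec.Proved.pow_int
import ProgX.Base.Spec.Proved.sin_poly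
import ProgX.Base.Spec.Proved.cos_poly
import ProgX.Base.Spec.Proved.ldexp
import ProgX.Base.Spec.Proved.floor
import ProgX.Base.Spec.Proved.sincos_quadrant
import ProgX.Base.Spec.Proved.exp
import ProgX.Base.Spec.Proved.log
import ProgX.Base.Spec.Proved.pow
import ProgX.Base.Spec.Proved.sin
import ProgX.Base.Spec.Proved.cos
import ProgX.Base.Spec.Proved.heap_product_ok
import ProgX.Base.Spec.Proved.heap_live_size
import ProgX.Base.Spec.Proved.heap_alloc
import ProgX.Base.Spec.Proved.malloc
import ProgX.Base.Spec.Proved.free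
import ProgX.Base.Spec.Proved.calloc
import ProgX.Base.Spec.Proved.reallocarray
import ProgX.Base.Spec.Proved.realloc
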